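-- pv_equiv track=rewrite | github.com/zhenyakeg/Final_preparation | 1st term/25-26.grasshooper.py | count_trajectories
-- ===== SOURCE A (Python) =====
-- def count_trajectories(n):
--     k =[1, 1]
--     for i in range(2, n+1):
--         k.append(k[i-2] + k[i-1])
--     return k[n]
--     '''Кузнечик может прыгать либо на следующую клетку, либо через
--     одну, тогда число траекторий в точку i складываетсся из
--     числа траекторий в предыдущую точку и через одну наза'''
-- ===== SOURCE B (Python) =====
-- def count_trajectories(n):
--     # Fast-doubling Fibonacci: the answer is F(n+1) with F(1)=F(2)=1.
--     if n < 0: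
--         return 0
--     def fib(m):
--         # returns (F(m), F(m+1))
--         if m == 0:
--             return (0, 1)
--         a, b = fib(m >> 1)
--         c = a * (2 * b - a)
--         d = a * a + b * b
--         if m & 1:
--             return (d, c + d)
--         return (c, d)
--     return fib(n + 1)[0]
-- ===== Notes on version B (the rewrite author's own statement) =====
-- stated objective: faster
-- what changed: Replaces the O(n) list-building Fibonacci loop with O(log n) fast-doubling recursion (and returns 0 for negative cells instead of A's negative-index wraparound).
-- intended difference: For n = -1 and n = -2, A returns 1 only because Python's negative indexing wraps around into the seed list; B returns 0, the intended count of trajectories to a cell before the start. — e.g. on count_trajectories(-1): A returns 1, B returns 0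
import Mathlib
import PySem

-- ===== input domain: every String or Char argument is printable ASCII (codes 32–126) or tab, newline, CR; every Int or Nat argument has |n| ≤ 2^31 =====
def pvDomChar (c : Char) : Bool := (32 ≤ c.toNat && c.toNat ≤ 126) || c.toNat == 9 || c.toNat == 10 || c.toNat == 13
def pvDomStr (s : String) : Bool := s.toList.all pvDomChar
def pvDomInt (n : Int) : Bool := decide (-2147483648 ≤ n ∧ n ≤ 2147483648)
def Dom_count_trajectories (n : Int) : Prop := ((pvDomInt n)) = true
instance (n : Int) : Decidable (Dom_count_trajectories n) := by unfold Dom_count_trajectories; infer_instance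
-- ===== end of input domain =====

-- B replaces A's O(n) list-building loop by O(log n) fast-doubling Fibonacci (objective: faster);
-- on n = -1, -2 B returns the intended 0 instead of A's negative-index wraparound value 1.

-- ===== PORT A =====
def count_trajectories (n : Int) : Int :=
  let k := (PySem.List.pyRange 2 (n + 1) 1).foldl
    (fun k i => k ++ [PySem.List.pyGetD k (i - 2) 0 + PySem.List.pyGetD k (i - 1) 0])
    [1, 1]
  PySem.List.pyGetD k n 0

-- ===== PORT B =====
-- fast-doubling helper: returns (F(m), F(m+1)); B's recursion on m >> 1 (m is ≥ 0 whenever called)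
def fibPair (m : Nat) : Int × Int :=
  if h : m = 0 then (0, 1)
  else
    let p := fibPair (m / 2)
    let a := p.1
    let b := p.2
    let c := a * (2 * b - a)
    let d := a * a + b * b
    if m % 2 = 1 then (d, c + d) else (c, d)
termination_by m
decreasing_by exact Nat.div_lt_self (Nat.pos_of_ne_zero h) one_lt_two

def count_trajectories_alt (n : Int) : Int :=
  if n < 0 then 0 else (fibPair (n + 1).toNat).1

-- ===== PRECONDITION & SPEC =====
-- Pre_ excludes n ≤ -3, where A raises IndexError (k[n] out of range on the 2-element seed list).
def Pre_count_trajectories (n : Int) : Prop := -2 ≤ n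
instance (n : Int) : Decidable (Pre_count_trajectories n) := by unfold Pre_count_trajectories; infer_instance
def pvWitness_count_trajectories : Int := 5

-- For n = -1 and n = -2, A returns 1 only because Python's negative indexing wraps into the seed
-- list [1, 1]; B returns 0, the intended number of trajectories to a cell before the start.
def D_count_trajectories (n : Int) : Prop := n = -1 ∨ n = -2
instance (n : Int) : Decidable (D_count_trajectories n) := by unfold D_count_trajectories; infer_instance
def Spec_count_trajectories (n : Int) (out : Int) : Prop := ¬ D_count_trajectories n → out = count_trajectories_alt n
instance (n : Int) (out : Int) : Decidable (Spec_count_trajectories n out) := by unfold Spec_count_trajectories; infer_instance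
def pvDiffWitness_count_trajectories : Int := -1
def pvDiffWitnessOut_count_trajectories : Int × Int := (1, 0)

-- ===== CLAIM (what is proved, stated in full; the proofs are below) =====
def Claim_unchanged_count_trajectories : Prop := ∀ (n : Int), Dom_count_trajectories n → Pre_count_trajectories n → Spec_count_trajectories n (count_trajectories n)
def Claim_changed_count_trajectories : Prop := Dom_count_trajectories (pvDiffWitness_count_trajectories) ∧ Pre_count_trajectories (pvDiffWitness_count_trajectories) ∧ D_count_trajectories (pvDiffWitness_count_trajectories) ∧ count_trajectories (pvDiffWitness_count_trajectories) = pvDiffWitnessOut_count_trajectories.1 ∧ count_trajectories_alt (pvDiffWitness_count_trajectories) = pvDiffWitnessOut_count_trajectories.2 ∧ pvDiffWitnessOut_count_trajectories.1 ≠ pvDiffWitnessOut_count_trajectories.2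
def Claim_exact_count_trajectories : Prop := ∀ (n : Int), Dom_count_trajectories n → Pre_count_trajectories n → D_count_trajectories n → count_trajectories n ≠ count_trajectories_alt n

-- ===== LEMMAS AND PROOFS =====

theorem fibPair_eq (m : Nat) : fibPair m = ((Nat.fib m : Int), (Nat.fib (m + 1) : Int)) := by
  induction m using Nat.strong_induction_on with
  | _ m ih =>
    rw [fibPair]
    by_cases h : m = 0
    · simp [h]
    · simp only [h, dif_neg, not_false_iff]
      rw [ih (m / 2) (Nat.div_lt_self (Nat.pos_of_ne_zero h) one_lt_two)]
      set k := m / 2 with hk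
      have h1 : Nat.fib k ≤ Nat.fib (k + 1) := Nat.fib_mono (Nat.le_succ k)
      have hle : Nat.fib k ≤ 2 * Nat.fib (k + 1) := by omega
      have h2k : (Nat.fib (2 * k) : Int)
          = (Nat.fib k : Int) * (2 * (Nat.fib (k + 1) : Int) - (Nat.fib k : Int)) := by
        rw [Nat.fib_two_mul]; push_cast [hle]; ring
      have h2k1 : (Nat.fib (2 * k + 1) : Int)
          = (Nat.fib k : Int) * (Nat.fib k : Int)
            + (Nat.fib (k + 1) : Int) * (Nat.fib (k + 1) : Int) := by
        rw [Nat.fib_two_mul_add_one]; push_cast; ring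
      by_cases hp : m % 2 = 1
      · have hm : m = 2 * k + 1 := by omega
        have h2k2 : (Nat.fib (2 * k + 2) : Int)
            = (Nat.fib (2 * k) : Int) + (Nat.fib (2 * k + 1) : Int) := by
          rw [Nat.fib_add_two]; push_cast; ring
        simp only [hp, if_pos]
        rw [hm]
        refine Prod.ext ?_ ?_ <;> simp [h2k1, h2k2, h2k]
      · have hm : m = 2 * k := by omega
        simp only [hp, if_neg, not_false_iff]
        rw [hm]
        refine Prod.ext ?_ ?_ <;> simp [h2k, h2k1]

-- A's loop invariant: after processing range(2, m+2) the list is [F(1), …, F(m+2)]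
theorem buildA (m : Nat) :
    (PySem.List.pyRange 2 ((m : Int) + 2) 1).foldl
      (fun k i => k ++ [PySem.List.pyGetD k (i - 2) 0 + PySem.List.pyGetD k (i - 1) 0])
      [1, 1]
    = (List.range (m + 2)).map (fun j => (Nat.fib (j + 1) : Int)) := by
  induction m with
  | zero =>
    rw [PySem.List.pyRange_one_eq_nil (by norm_num)]
    simp [List.range_succ]
  | succ m ih =>
    have hcast : ((m + 1 : Nat) : Int) + 2 = ((m : Int) + 2) + 1 := by push_cast; ring
    rw [hcast, PySem.List.pyRange_one_succ_right (by omega), List.foldl_append, ih]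
    simp only [List.foldl_cons, List.foldl_nil]
    have hg1 : PySem.List.pyGetD ((List.range (m + 2)).map (fun j => (Nat.fib (j + 1) : Int)))
        ((m : Int) + 2 - 2) 0 = (Nat.fib (m + 1) : Int) := by
      have : (m : Int) + 2 - 2 = ((m : Nat) : Int) := by ring
      rw [this, PySem.List.pyGetD_natCast]
      simp [List.getD_eq_getElem?_getD]
    have hg2 : PySem.List.pyGetD ((List.range (m + 2)).map (fun j => (Nat.fib (j + 1) : Int)))
        ((m : Int) + 2 - 1) 0 = (Nat.fib (m + 2) : Int) := by
      have : (m : Int) + 2 - 1 = ((m + 1 : Nat) : Int) := by push_cast; ring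
      rw [this, PySem.List.pyGetD_natCast]
      simp [List.getD_eq_getElem?_getD]
    rw [hg1, hg2]
    have hfib : (Nat.fib (m + 1) : Int) + (Nat.fib (m + 2) : Int) = (Nat.fib (m + 3) : Int) := by
      have := Nat.fib_add_two (n := m + 1)
      push_cast [this]; ring
    rw [hfib, List.range_succ (n := m + 2), List.map_append]
    simp

theorem countA_nat (n : Nat) : count_trajectories (n : Int) = (Nat.fib (n + 1) : Int) := by
  cases n with
  | zero => decide
  | succ m =>
    unfold count_trajectories
    have hcast : ((m + 1 : Nat) : Int) + 1 = (m : Int) + 2 := by push_cast; ring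
    rw [hcast, buildA m]
    rw [PySem.List.pyGetD_natCast]
    simp [List.getD_eq_getElem?_getD]

theorem countB_nat (n : Nat) : count_trajectories_alt (n : Int) = (Nat.fib (n + 1) : Int) := by
  unfold count_trajectories_alt
  rw [if_neg (by omega)]
  have : ((n : Int) + 1).toNat = n + 1 := by omega
  rw [this, fibPair_eq]

-- ===== VERDICT (by name: the statement is the Claim_ definition above) =====
theorem count_trajectories_spec : Claim_unchanged_count_trajectories := by
  intro n _ hpre hnd
  unfold Pre_count_trajectories at hpre
  unfold D_count_trajectories at hnd
  have h0 : 0 ≤ n := by omega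
  obtain ⟨m, rfl⟩ : ∃ m : Nat, n = (m : Int) := ⟨n.toNat, by omega⟩
  rw [countA_nat, countB_nat]

theorem count_trajectories_changed : Claim_changed_count_trajectories := by
  unfold Claim_changed_count_trajectories; decide

theorem count_trajectories_tight : Claim_exact_count_trajectories := by
  intro n _ _ hd
  unfold D_count_trajectories at hd
  rcases hd with rfl | rfl <;> decide
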